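-- pv_equiv track=rewrite | github.com/HDFGroup/hsds | hsds/util/httpUtil.py | get_base_url
-- ===== SOURCE A (Python) =====
-- def get_base_url(url):
--     """return protocal+dns+port part of url.
--     Returns just url if a non-standard protocol is given."""
--     n = len(url)
--     for protocol in ("http://", "https://", "http+unix://"):
--         if url.startswith(protocol):
--             start = len(protocol)
--             n = url.find("/", start)
--             if n < 0:
--                 n = len(url)
--             break
--     s = url[:n]
--     return s
-- ===== SOURCE B (Python) =====
-- def get_base_url(url):
--     """return protocal+dns+port part of url.
--     Returns just url if a non-standard protocol is given."""
--     parts = url.split("/")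
--     if len(parts) > 1 and parts[0] in ("http:", "https:", "http+unix:") and parts[1] == "":
--         return "/".join(parts[:3])
--     return url
-- ===== Notes on version B (the rewrite author's own statement) =====
-- stated objective: alternative
-- what changed: B splits the url once into its slash-separated components and rejoins the first three (after checking the first component is a known scheme and the second is empty), instead of A's prefix-matching loop over three protocol strings with a find-from-offset.
import Mathlib
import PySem

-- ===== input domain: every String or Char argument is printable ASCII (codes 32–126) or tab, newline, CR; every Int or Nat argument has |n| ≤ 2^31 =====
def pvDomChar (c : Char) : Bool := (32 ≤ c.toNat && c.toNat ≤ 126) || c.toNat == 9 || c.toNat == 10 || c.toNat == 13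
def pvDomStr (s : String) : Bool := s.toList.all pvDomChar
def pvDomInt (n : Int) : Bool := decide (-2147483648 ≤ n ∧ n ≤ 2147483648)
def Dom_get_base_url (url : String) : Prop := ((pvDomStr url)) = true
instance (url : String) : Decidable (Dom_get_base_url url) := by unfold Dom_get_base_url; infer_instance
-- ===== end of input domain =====

-- B splits the url once into its slash-separated components and rejoins the first three
-- (after checking the first component is a known scheme and the second is empty), instead
-- of A's prefix-matching loop with a find-from-offset (objective: alternative; same cost).

-- ===== PORT A =====
-- the tuple ("http://", "https://", "http+unix://")
def gbuProtocols : List (List Char) :=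
  [['h','t','t','p',':','/','/'],
   ['h','t','t','p','s',':','/','/'],
   ['h','t','t','p','+','u','n','i','x',':','/','/']]

-- the for-loop with break: first matching protocol sets n, otherwise n stays len(url)
def gbuLoop (url : List Char) (n : Int) : List (List Char) → Int
  | [] => n
  | protocol :: rest =>
    if PySem.Chars.startswith url protocol then
      let start : Int := (protocol.length : Int)
      let n' := PySem.Chars.findFrom url ['/'] start
      if n' < 0 then (url.length : Int) else n'
    else gbuLoop url n rest

def get_base_url (url : String) : String :=
  let n : Int := PySem.Str.len url
  PySem.Str.slice url none (some (gbuLoop url.toList n gbuProtocols))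

-- ===== PORT B =====
-- the tuple ("http:", "https:", "http+unix:")
def gbuSchemes : List (List Char) :=
  [['h','t','t','p',':'],
   ['h','t','t','p','s',':'],
   ['h','t','t','p','+','u','n','i','x',':']]

-- parts = url.split("/"); if len(parts) > 1 and parts[0] in (…) and parts[1] == "":
--   return "/".join(parts[:3]); return url
def get_base_url_alt (url : String) : String :=
  match PySem.Chars.splitOn url.toList ['/'] with
  | p0 :: p1 :: rest =>
    if p0 ∈ gbuSchemes ∧ p1 = [] then
      String.ofList (PySem.Chars.join ['/'] (p0 :: p1 :: rest.take 1))
    else url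
  | _ => url

-- ===== PRECONDITION & SPEC =====
def Spec_get_base_url (url : String) (out : String) : Prop := out = get_base_url_alt url
instance (url : String) (out : String) : Decidable (Spec_get_base_url url out) := by unfold Spec_get_base_url; infer_instance

-- ===== CLAIM (what is proved, stated in full; the proofs are below) =====
def Claim_equal_get_base_url : Prop := ∀ (url : String), Dom_get_base_url url → Spec_get_base_url url (get_base_url url)

-- ===== LEMMAS AND PROOFS =====

-- reference form of split-on-a-single-character: pre is the piece being built
def gbuMsp (c : Char) (pre : List Char) : List Char → List (List Char)
  | [] => [pre]
  | x :: rest => if x = c then pre :: gbuMsp c [] rest else gbuMsp c (pre ++ [x]) rest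

lemma gbu_go_eq_msp (c : Char) (l : List Char) : ∀ (fuel : Nat) (cur : List Char)
    (acc : List (List Char)), l.length ≤ fuel →
    PySem.Chars.splitOn.go [c] fuel l cur acc = acc.reverse ++ gbuMsp c cur.reverse l := by
  induction l with
  | nil =>
    intro fuel cur acc _
    cases fuel <;> simp [PySem.Chars.splitOn.go, gbuMsp]
  | cons x rest ih =>
    intro fuel cur acc hfuel
    cases fuel with
    | zero => simp at hfuel
    | succ f =>
      by_cases hx : x = c
      · subst hx
        have hpre : List.isPrefixOf [x] (x :: rest) = true := by
          simp [List.isPrefixOf]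
        rw [PySem.Chars.splitOn.go, if_pos hpre]
        simp only [List.length_cons, List.length_nil, List.drop_succ_cons, List.drop_zero]
        rw [ih f [] (cur.reverse :: acc) (by simpa using hfuel)]
        simp [gbuMsp]
      · have hpre : ¬ List.isPrefixOf [c] (x :: rest) = true := by
          intro h
          simp [List.isPrefixOf] at h
          exact hx h.symm
        rw [PySem.Chars.splitOn.go, if_neg hpre]
        rw [ih f (x :: cur) acc (by simpa using Nat.le_of_succ_le_succ hfuel)]
        simp [gbuMsp, hx]

lemma gbu_splitOn_eq_msp (c : Char) (s : List Char) :
    PySem.Chars.splitOn s [c] = gbuMsp c [] s := by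
  unfold PySem.Chars.splitOn
  rw [gbu_go_eq_msp c s (s.length + 1) [] [] (by omega)]
  simp

lemma gbu_msp_no (c : Char) (l : List Char) : ∀ pre, c ∉ l → gbuMsp c pre l = [pre ++ l] := by
  induction l with
  | nil => intro pre _; simp [gbuMsp]
  | cons x rest ih =>
    intro pre h
    have hx : ¬ x = c := fun he => h (he ▸ List.mem_cons_self)
    simp only [gbuMsp, if_neg hx]
    rw [ih (pre ++ [x]) (fun hm => h (List.mem_cons_of_mem _ hm))]
    simp

lemma gbu_msp_split (c : Char) (a : List Char) : ∀ pre t, c ∉ a →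
    gbuMsp c pre (a ++ c :: t) = (pre ++ a) :: gbuMsp c [] t := by
  induction a with
  | nil => intro pre t _; simp [gbuMsp]
  | cons x rest ih =>
    intro pre t h
    have hx : ¬ x = c := fun he => h (he ▸ List.mem_cons_self)
    simp only [List.cons_append, gbuMsp, if_neg hx]
    rw [ih (pre ++ [x]) t (fun hm => h (List.mem_cons_of_mem _ hm))]
    simp

lemma gbu_msp_ne_nil (c : Char) (l : List Char) : ∀ pre, gbuMsp c pre l ≠ [] := by
  induction l with
  | nil => intro pre; simp [gbuMsp]
  | cons x rest ih =>
    intro pre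
    by_cases hx : x = c <;> simp [gbuMsp, hx, ih]

lemma gbu_join_msp (c : Char) (l : List Char) : ∀ pre,
    PySem.Chars.join [c] (gbuMsp c pre l) = pre ++ l := by
  induction l with
  | nil => intro pre; simp [gbuMsp, PySem.Chars.join_singleton]
  | cons x rest ih =>
    intro pre
    by_cases hx : x = c
    · subst hx
      rw [show gbuMsp x pre (x :: rest) = pre :: gbuMsp x [] rest from by simp [gbuMsp]]
      cases h : gbuMsp x [] rest with
      | nil => exact absurd h (gbu_msp_ne_nil x rest [])
      | cons y ys =>
        have h2 : PySem.Chars.join [x] (y :: ys) = rest := by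
          rw [← h, ih []]
          simp
        rw [PySem.Chars.join_cons_cons, h2]
        simp
    · simp only [gbuMsp, if_neg hx]
      rw [ih (pre ++ [x])]
      simp

-- first occurrence of c in (b ++ c :: u) is at index b.length when c ∉ b
lemma gbu_find_first (c : Char) (b u : List Char) (h : c ∉ b) :
    PySem.Chars.find (b ++ c :: u) [c] = (b.length : Int) := by
  set s := b ++ c :: u with hsdef
  have hdropb : s.drop b.length = c :: u := List.drop_left' rfl
  have hinfix : [c] <:+: s := ⟨b, u, by simp [hsdef]⟩
  have hnn : 0 ≤ PySem.Chars.find s [c] := (PySem.Chars.find_nonneg_iff _ _).mpr hinfix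
  obtain ⟨hpre, hmin⟩ := PySem.Chars.find_spec hnn
  have hle : (PySem.Chars.find s [c]).toNat ≤ b.length := by
    by_contra hlt
    push_neg at hlt
    exact hmin b.length hlt (by rw [hdropb]; exact ⟨u, rfl⟩)
  have hge : b.length ≤ (PySem.Chars.find s [c]).toNat := by
    by_contra hlt
    push_neg at hlt
    set k := (PySem.Chars.find s [c]).toNat with hk
    have hdropk : s.drop k = b.drop k ++ c :: u := by
      rw [hsdef]
      exact List.drop_append_of_le_length (Nat.le_of_lt hlt)
    have hcons : b.drop k = b[k] :: b.drop (k + 1) := List.drop_eq_getElem_cons hlt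
    rw [hdropk, hcons] at hpre
    have : c = b[k] := (List.cons_prefix_cons.mp hpre).1
    exact h (this ▸ List.getElem_mem hlt)
  have : (PySem.Chars.find s [c]).toNat = b.length := le_antisymm hle hge
  omega

lemma gbu_find_none (c : Char) (t : List Char) (h : c ∉ t) :
    PySem.Chars.find t [c] = -1 := by
  apply (PySem.Chars.find_eq_neg_one_iff _ _).mpr
  intro hin
  obtain ⟨s1, s2, hs⟩ := hin
  exact h (by rw [← hs]; simp)

-- first-occurrence decomposition of a list containing c
lemma gbu_mem_split_first (c : Char) (l : List Char) (h : c ∈ l) :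
    ∃ b u, l = b ++ c :: u ∧ c ∉ b := by
  induction l with
  | nil => simp at h
  | cons x rest ih =>
    by_cases hx : x = c
    · exact ⟨[], rest, by simp [hx], by simp⟩
    · have hr : c ∈ rest := by
        rcases List.mem_cons.mp h with he | hr
        · exact absurd he.symm hx
        · exact hr
      obtain ⟨b, u, hbu, hnb⟩ := ih hr
      refine ⟨x :: b, u, by simp [hbu], ?_⟩
      intro hmem
      rcases List.mem_cons.mp hmem with he | hb
      · exact hx he.symm
      · exact hnb hb

-- the matched branch: A's slice at find("/", len(protocol)) equals B's rejoined prefix,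
-- for url = a ++ "//" ++ t with a the scheme-with-colon
lemma gbu_core (url : String) (a t : List Char) (k : Int) (hc : ('/' : Char) ∉ a)
    (hk : k = (a.length : Int) + 2)
    (hs : url.toList = a ++ '/' :: '/' :: t)
    (hm : a ∈ gbuSchemes) :
    PySem.Str.slice url none (some
      (if PySem.Chars.findFrom url.toList ['/'] k < 0 then (url.toList.length : Int)
       else PySem.Chars.findFrom url.toList ['/'] k)) = get_base_url_alt url := by
  have hlen : url.toList.length = a.length + 2 + t.length := by rw [hs]; simp; omega
  have hk' : k = ((a.length + 2 : Nat) : Int) := by push_cast; omega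
  have hkle : a.length + 2 ≤ url.toList.length := by omega
  have hdrop : url.toList.drop (a.length + 2) = t := by
    rw [hs, show a ++ '/' :: '/' :: t = (a ++ ['/','/']) ++ t by simp]
    exact List.drop_left' (by simp)
  have hff : PySem.Chars.findFrom url.toList ['/'] k =
      if PySem.Chars.find t ['/'] = -1 then -1
      else ((a.length + 2 : Nat) : Int) + PySem.Chars.find t ['/'] := by
    rw [hk', PySem.Chars.findFrom_natCast url.toList ['/'] (a.length + 2) hkle, hdrop]
  have hsplit : PySem.Chars.splitOn url.toList ['/'] = a :: [] :: gbuMsp '/' [] t := by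
    rw [gbu_splitOn_eq_msp, hs, gbu_msp_split '/' a [] ('/' :: t) hc]
    simp [gbuMsp]
  by_cases hmem : ('/' : Char) ∈ t
  · obtain ⟨b, u, hbu, hnb⟩ := gbu_mem_split_first '/' t hmem
    have hfind : PySem.Chars.find t ['/'] = (b.length : Int) := by
      rw [hbu]; exact gbu_find_first '/' b u hnb
    have hmsp : gbuMsp '/' [] t = b :: gbuMsp '/' [] u := by
      rw [hbu]; simpa using gbu_msp_split '/' b [] u hnb
    have hB : get_base_url_alt url = String.ofList (a ++ '/' :: '/' :: b) := by
      unfold get_base_url_alt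
      rw [hsplit]
      dsimp only
      rw [if_pos ⟨hm, rfl⟩, hmsp]
      simp only [List.take_succ_cons, List.take_zero]
      exact congrArg String.ofList (by
        rw [PySem.Chars.join_cons_cons, PySem.Chars.join_cons_cons,
            PySem.Chars.join_singleton]
        simp)
    have hffv : PySem.Chars.findFrom url.toList ['/'] k =
        ((a.length + 2 + b.length : Nat) : Int) := by
      rw [hff, hfind, if_neg (by omega)]
      push_cast
      ring
    rw [hB, hffv, if_neg (by omega)]
    apply String.toList_inj.mp
    rw [PySem.Str.toList_slice, PySem.Chars.slice_eq_listSlice,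
        PySem.List.slice_to _ (by omega), Int.toNat_natCast]
    rw [hs, hbu,
        show a ++ '/' :: '/' :: (b ++ '/' :: u) = (a ++ ['/','/'] ++ b) ++ '/' :: u by simp,
        show a.length + 2 + b.length = (a ++ ['/','/'] ++ b).length by simp; omega,
        List.take_left]
    simp
  · have hfind : PySem.Chars.find t ['/'] = -1 := gbu_find_none '/' t hmem
    have hmsp : gbuMsp '/' [] t = [t] := gbu_msp_no '/' t [] hmem
    have hB : get_base_url_alt url = String.ofList (a ++ '/' :: '/' :: t) := by
      unfold get_base_url_alt
      rw [hsplit]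
      dsimp only
      rw [if_pos ⟨hm, rfl⟩, hmsp]
      simp only [List.take_succ_cons, List.take_zero]
      exact congrArg String.ofList (by
        rw [PySem.Chars.join_cons_cons, PySem.Chars.join_cons_cons,
            PySem.Chars.join_singleton]
        simp)
    have hffv : PySem.Chars.findFrom url.toList ['/'] k = -1 := by
      rw [hff, if_pos hfind]
    rw [hB, hffv, if_pos (by omega)]
    apply String.toList_inj.mp
    rw [PySem.Str.toList_slice, PySem.Chars.slice_eq_listSlice,
        PySem.List.slice_to _ (by omega), Int.toNat_natCast]
    simp [hs]

-- if url starts with none of the three protocols, B returns url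
lemma gbu_alt_default (url : String)
    (h1 : ¬ PySem.Chars.startswith url.toList ['h','t','t','p',':','/','/'] = true)
    (h2 : ¬ PySem.Chars.startswith url.toList ['h','t','t','p','s',':','/','/'] = true)
    (h3 : ¬ PySem.Chars.startswith url.toList ['h','t','t','p','+','u','n','i','x',':','/','/'] = true) :
    get_base_url_alt url = url := by
  unfold get_base_url_alt
  rw [gbu_splitOn_eq_msp]
  have hjoin := gbu_join_msp '/' url.toList []
  cases hp : gbuMsp '/' [] url.toList with
  | nil => rfl
  | cons p0 ps =>
    cases ps with
    | nil => rfl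
    | cons p1 rest =>
      dsimp only
      by_cases hcond : p0 ∈ gbuSchemes ∧ p1 = []
      · obtain ⟨hm, hp1⟩ := hcond
        rw [hp, hp1] at hjoin
        simp only [List.nil_append] at hjoin
        cases rest with
        | nil =>
          -- url = p0 ++ "/": rejoining the (at most two) pieces rebuilds url
          rw [if_pos ⟨hm, hp1⟩, hp1]
          have hj2 : PySem.Chars.join ['/'] [p0, []] = p0 ++ ['/'] := by
            simp [PySem.Chars.join_cons_cons, PySem.Chars.join_singleton]
          simp only [List.take_nil, hj2]
          rw [hj2] at hjoin
          apply String.toList_inj.mp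
          simp [hjoin]
        | cons r rs =>
          -- url starts with p0 ++ "//": contradicts the failed startswith tests
          exfalso
          have hurl : url.toList = p0 ++ '/' :: '/' :: PySem.Chars.join ['/'] (r :: rs) := by
            rw [← hjoin, PySem.Chars.join_cons_cons, PySem.Chars.join_cons_cons]
            simp
          have hsw : PySem.Chars.startswith url.toList (p0 ++ ['/','/']) = true := by
            apply (PySem.Chars.startswith_iff _ _).mpr
            exact ⟨PySem.Chars.join ['/'] (r :: rs), by rw [hurl]; simp⟩
          simp only [gbuSchemes, List.mem_cons, List.not_mem_nil, or_false] at hm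
          rcases hm with he | he | he
          · subst he; exact h1 hsw
          · subst he; exact h2 hsw
          · subst he; exact h3 hsw
      · rw [if_neg hcond]

-- a startswith hypothesis gives the decomposition url = protocol ++ rest
lemma gbu_split_of_startswith (url : String) (p : List Char)
    (h : PySem.Chars.startswith url.toList p = true) :
    ∃ t, url.toList = p ++ t := by
  obtain ⟨t, ht⟩ := (PySem.Chars.startswith_iff _ _).mp h
  exact ⟨t, ht.symm⟩

-- ===== VERDICT (by name: the statement is the Claim_ definition above) =====
theorem get_base_url_spec : Claim_equal_get_base_url := by
  intro url _
  unfold Spec_get_base_url get_base_url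
  simp only [PySem.Str.len_eq]
  by_cases h1 : PySem.Chars.startswith url.toList ['h','t','t','p',':','/','/'] = true
  · obtain ⟨t, ht⟩ := gbu_split_of_startswith url _ h1
    simp only [gbuProtocols, gbuLoop, h1, if_true, List.length_cons, List.length_nil]
    exact gbu_core url ['h','t','t','p',':'] t _ (by decide) (by decide)
      (by rw [ht]; rfl) (by simp [gbuSchemes])
  · by_cases h2 : PySem.Chars.startswith url.toList ['h','t','t','p','s',':','/','/'] = true
    · obtain ⟨t, ht⟩ := gbu_split_of_startswith url _ h2
      simp only [gbuProtocols, gbuLoop, h1, h2, if_true, if_false, List.length_cons,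
        List.length_nil]
      exact gbu_core url ['h','t','t','p','s',':'] t _ (by decide) (by decide)
        (by rw [ht]; rfl) (by simp [gbuSchemes])
    · by_cases h3 : PySem.Chars.startswith url.toList
          ['h','t','t','p','+','u','n','i','x',':','/','/'] = true
      · obtain ⟨t, ht⟩ := gbu_split_of_startswith url _ h3
        simp only [gbuProtocols, gbuLoop, h1, h2, h3, if_true, if_false, List.length_cons,
          List.length_nil]
        exact gbu_core url ['h','t','t','p','+','u','n','i','x',':'] t _ (by decide) (by decide)
          (by rw [ht]; rfl) (by simp [gbuSchemes])
      · simp only [gbuProtocols, gbuLoop, h1, h2, h3, if_false]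
        rw [gbu_alt_default url h1 h2 h3]
        apply String.toList_inj.mp
        rw [PySem.Str.toList_slice, PySem.Chars.slice_eq_listSlice,
            PySem.List.slice_to _ (by omega)]
        simp
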